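-- pv_equiv track=rewrite | github.com/git163/patch | gui/main_window.py | _markdown_table_to_html
-- ===== SOURCE A (Python) =====
-- def _markdown_table_to_html(md: str) -> str:
--     """Simple converter for markdown tables to HTML with centered table."""
--     lines = md.strip().splitlines()
--     in_table = False
--     html_lines = [
--         "<html>"
--         "<body style='font-family: sans-serif; font-size: 14px; text-align: center;'>"
--     ]
--     for line in lines:
--         stripped = line.strip()
--         if stripped.startswith("|") and stripped.endswith("|"):
--             if not in_table:
--                 html_lines.append(
--                     "<table border='1' cellpadding='8' cellspacing='0' "
--                     "style='border-collapse: collapse; margin: 0 auto;'>"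
--                 )
--                 in_table = True
--             cells = [c.strip() for c in stripped[1:-1].split("|")]
--             # Skip separator lines
--             if all(c.replace("-", "") == "" for c in cells):
--                 continue
--             html_lines.append("<tr>")
--             for cell in cells:
--                 html_lines.append(
--                     f"<td style='border:1px solid #ccc; padding:6px 14px; text-align:left;'>"
--                     f"{cell}</td>"
--                 )
--             html_lines.append("</tr>")
--         else:
--             if in_table:
--                 html_lines.append("</table>")
--                 in_table = False
--             html_lines.append(f"<p style='margin: 10px 0;'>{stripped}</p>")
--     if in_table:
--         html_lines.append("</table>")
--     html_lines.append("</body></html>")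
--     return "\n".join(html_lines)
-- ===== SOURCE B (Python) =====
-- def _markdown_table_to_html(md: str) -> str:
--     """Two-phase: group stripped lines into blocks (maximal runs of table
--     lines, single paragraphs), then render each block."""
--
--     def is_tbl(s):
--         return s.startswith("|") and s.endswith("|")
--
--     def run_end(ls, i):
--         # end of the maximal run of table lines starting at i
--         while i < len(ls) and is_tbl(ls[i]):
--             i += 1
--         return i
--
--     def blocks(ls):
--         out, i = [], 0
--         while i < len(ls):
--             if is_tbl(ls[i]):
--                 j = run_end(ls, i)
--                 out.append(ls[i:j])      # table block: list of rows
--                 i = j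
--             else:
--                 out.append(ls[i])        # paragraph block: a string
--                 i += 1
--         return out
--
--     def render_row(row):
--         cells = [c.strip() for c in row[1:-1].split("|")]
--         if all(c.replace("-", "") == "" for c in cells):
--             return []                    # separator row
--         return (["<tr>"]
--                 + ["<td style='border:1px solid #ccc; padding:6px 14px; text-align:left;'>"
--                    f"{c}</td>" for c in cells]
--                 + ["</tr>"])
--
--     stripped = [ln.strip() for ln in md.strip().splitlines()]
--     pieces = [
--         "<html>"
--         "<body style='font-family: sans-serif; font-size: 14px; text-align: center;'>"
--     ]
--     for b in blocks(stripped):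
--         if isinstance(b, list):
--             pieces.append(
--                 "<table border='1' cellpadding='8' cellspacing='0' "
--                 "style='border-collapse: collapse; margin: 0 auto;'>"
--             )
--             for row in b:
--                 pieces.extend(render_row(row))
--             pieces.append("</table>")
--         else:
--             pieces.append(f"<p style='margin: 10px 0;'>{b}</p>")
--     pieces.append("</body></html>")
--     return "\n".join(pieces)
-- ===== Notes on version B (the rewrite author's own statement) =====
-- stated objective: alternative
-- what changed: B replaces A's single pass with an in_table flag by a two-phase algorithm: first group the stripped lines into blocks (maximal runs of table lines via an index run-scan, single paragraph lines), then render each block independently.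
import Mathlib
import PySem

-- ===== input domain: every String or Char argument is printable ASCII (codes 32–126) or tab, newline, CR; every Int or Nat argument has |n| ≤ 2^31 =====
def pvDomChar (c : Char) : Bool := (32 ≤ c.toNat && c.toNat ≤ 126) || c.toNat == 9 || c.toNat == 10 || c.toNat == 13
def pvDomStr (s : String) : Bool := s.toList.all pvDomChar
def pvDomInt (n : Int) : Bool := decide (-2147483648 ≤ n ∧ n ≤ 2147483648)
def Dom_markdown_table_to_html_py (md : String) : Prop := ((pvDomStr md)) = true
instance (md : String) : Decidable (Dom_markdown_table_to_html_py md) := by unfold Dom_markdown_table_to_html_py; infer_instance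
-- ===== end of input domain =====

-- B groups the stripped lines into blocks (maximal runs of table lines, single paragraphs)
-- first and renders each block in a second pass, instead of A's single pass with an in_table flag;
-- objective: alternative decomposition, same cost.

-- shared string constants (identical literals in both Pythons)
def pvHeader : String :=
  "<html><body style='font-family: sans-serif; font-size: 14px; text-align: center;'>"
def pvTableOpen : String :=
  "<table border='1' cellpadding='8' cellspacing='0' style='border-collapse: collapse; margin: 0 auto;'>"
def pvTd (cell : String) : String :=
  "<td style='border:1px solid #ccc; padding:6px 14px; text-align:left;'>" ++ cell ++ "</td>"
def pvPara (s : String) : String := "<p style='margin: 10px 0;'>" ++ s ++ "</p>"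

-- ===== PORT A =====
-- cells = [c.strip() for c in stripped[1:-1].split("|")]
def pvACells (stripped : String) : List String :=
  ((PySem.Str.split? (PySem.Str.slice stripped (some 1) (some (-1))) "|").getD []).map PySem.Str.strip
-- all(c.replace("-", "") == "" for c in cells)
def pvIsSep (cells : List String) : Bool :=
  cells.all (fun c => PySem.Str.replace c "-" "" == "")

-- the for-loop over lines, state = (in_table, html_lines)
def pvALoop : List String → Bool → List String → Bool × List String
  | [], inT, acc => (inT, acc)
  | line :: rest, inT, acc =>
    let stripped := PySem.Str.strip line
    if PySem.Str.startswith stripped "|" && PySem.Str.endswith stripped "|" then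
      let acc := if inT then acc else acc ++ [pvTableOpen]
      let cells := pvACells stripped
      if pvIsSep cells then pvALoop rest true acc
      else pvALoop rest true (acc ++ ["<tr>"] ++ cells.map pvTd ++ ["</tr>"])
    else
      let acc := if inT then acc ++ ["</table>"] else acc
      pvALoop rest false (acc ++ [pvPara stripped])

def markdown_table_to_html_py (md : String) : String :=
  let lines := PySem.Str.splitlines (PySem.Str.strip md)
  let (inT, htmlLines) := pvALoop lines false [pvHeader]
  PySem.Str.join "\n"
    ((htmlLines ++ (if inT then ["</table>"] else [])) ++ ["</body></html>"])

-- ===== PORT B =====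
def pvIsTbl (s : String) : Bool :=
  PySem.Str.startswith s "|" && PySem.Str.endswith s "|"

inductive MdBlock : Type
  | table : List String → MdBlock   -- a maximal run of table lines
  | para : String → MdBlock         -- a single paragraph line

-- the run scan (run_end + the slice ls[i:j] / remainder) as one structural recursion
def pvSplitRun : List String → List String × List String
  | [] => ([], [])
  | s :: rest =>
    if pvIsTbl s then
      let p := pvSplitRun rest
      (s :: p.1, p.2)
    else ([], s :: rest)

theorem pvSplitRun_snd_len (ls : List String) : (pvSplitRun ls).2.length ≤ ls.length := by
  induction ls with
  | nil => simp [pvSplitRun]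
  | cons s rest ih =>
    simp only [pvSplitRun]
    split
    · simpa using Nat.le_succ_of_le ih
    · simp

-- blocks(ls): the while loop over the line list
def pvBlocks : List String → List MdBlock
  | [] => []
  | s :: rest =>
    if pvIsTbl s then
      let p := pvSplitRun (s :: rest)
      MdBlock.table p.1 :: pvBlocks p.2
    else
      MdBlock.para s :: pvBlocks rest
termination_by ls => ls.length
decreasing_by
  · simp only [pvSplitRun, *, if_pos]
    simpa using Nat.lt_succ_of_le (pvSplitRun_snd_len rest)
  · simp

-- render_row
def pvRenderRow (row : String) : List String :=
  let cells := ((PySem.Str.split? (PySem.Str.slice row (some 1) (some (-1))) "|").getD []).map PySem.Str.strip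
  if cells.all (fun c => PySem.Str.replace c "-" "" == "") then []
  else ["<tr>"] ++ cells.map pvTd ++ ["</tr>"]

-- the rendering loop over blocks
def pvRenderBlock : MdBlock → List String
  | MdBlock.table rows => [pvTableOpen] ++ rows.flatMap pvRenderRow ++ ["</table>"]
  | MdBlock.para s => [pvPara s]

def markdown_table_to_html_py_alt (md : String) : String :=
  let stripped := (PySem.Str.splitlines (PySem.Str.strip md)).map PySem.Str.strip
  PySem.Str.join "\n"
    ([pvHeader] ++ (pvBlocks stripped).flatMap pvRenderBlock ++ ["</body></html>"])

-- ===== PRECONDITION & SPEC =====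
def Spec_markdown_table_to_html_py (md : String) (out : String) : Prop := out = markdown_table_to_html_py_alt md
instance (md : String) (out : String) : Decidable (Spec_markdown_table_to_html_py md out) := by unfold Spec_markdown_table_to_html_py; infer_instance

-- ===== CLAIM (what is proved, stated in full; the proofs are below) =====
def Claim_equal_markdown_table_to_html_py : Prop := ∀ (md : String), Dom_markdown_table_to_html_py md → Spec_markdown_table_to_html_py md (markdown_table_to_html_py md)

-- ===== LEMMAS AND PROOFS =====

-- close the table at the end of A's loop, as A's trailing 'if in_table' does
def pvFin (r : Bool × List String) : List String :=
  r.2 ++ (if r.1 then ["</table>"] else [])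

theorem pvSplitRun_eq (ls : List String) :
    pvSplitRun ls = (ls.takeWhile pvIsTbl, ls.dropWhile pvIsTbl) := by
  induction ls with
  | nil => simp [pvSplitRun]
  | cons s rest ih =>
    by_cases h : pvIsTbl s <;> simp [pvSplitRun, h, ih, List.takeWhile, List.dropWhile]

theorem pvBlocks_nil : pvBlocks [] = [] := by simp [pvBlocks]

theorem pvBlocks_cons_para (s : String) (rest : List String) (h : pvIsTbl s = false) :
    pvBlocks (s :: rest) = MdBlock.para s :: pvBlocks rest := by
  rw [pvBlocks]; simp [h]

theorem pvBlocks_cons_tbl (s : String) (rest : List String) (h : pvIsTbl s = true) :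
    pvBlocks (s :: rest) =
      MdBlock.table (s :: rest.takeWhile pvIsTbl) :: pvBlocks (rest.dropWhile pvIsTbl) := by
  rw [pvBlocks]; simp [h, pvSplitRun_eq, pvSplitRun]

-- A's per-row contribution is B's render_row
theorem pvRenderRow_eq (row : String) :
    pvRenderRow row =
      if pvIsSep (pvACells row) then []
      else ["<tr>"] ++ (pvACells row).map pvTd ++ ["</tr>"] := by
  simp [pvRenderRow, pvACells, pvIsSep]

-- loop invariant: A's single pass with the in_table flag computes exactly B's
-- grouped rendering (false state: fresh blocks; true state: the current table
-- block continues through the maximal run of table lines, then is closed)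
theorem pvLoop_eq (lines : List String) :
    (∀ acc, pvFin (pvALoop lines false acc) =
        acc ++ (pvBlocks (lines.map PySem.Str.strip)).flatMap pvRenderBlock)
    ∧ (∀ acc, pvFin (pvALoop lines true acc) =
        acc ++ ((lines.map PySem.Str.strip).takeWhile pvIsTbl).flatMap pvRenderRow
            ++ ["</table>"]
            ++ (pvBlocks ((lines.map PySem.Str.strip).dropWhile pvIsTbl)).flatMap pvRenderBlock) := by
  induction lines with
  | nil => simp [pvALoop, pvFin, pvBlocks_nil]
  | cons line rest ih =>
    have hrow : ∀ acc : List String,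
        (if pvIsSep (pvACells (PySem.Str.strip line)) = true then pvALoop rest true acc
         else pvALoop rest true
           (acc ++ ["<tr>"] ++ (pvACells (PySem.Str.strip line)).map pvTd ++ ["</tr>"])) =
        pvALoop rest true (acc ++ pvRenderRow (PySem.Str.strip line)) := by
      intro acc
      rw [pvRenderRow_eq]
      by_cases h : pvIsSep (pvACells (PySem.Str.strip line)) <;> simp [h]
    by_cases h : pvIsTbl (PySem.Str.strip line)
    · constructor
      · intro acc
        have h' := h; unfold pvIsTbl at h'
        simp only [pvALoop, h', if_true, if_false, Bool.false_eq_true]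
        rw [hrow _, ih.2]
        simp [List.map_cons, pvBlocks_cons_tbl _ _ h, pvRenderBlock]
      · intro acc
        have h' := h; unfold pvIsTbl at h'
        simp only [pvALoop, h', if_true]
        rw [hrow _, ih.2]
        simp [List.map_cons, List.takeWhile_cons_of_pos, h, List.dropWhile_cons_of_pos]
    · have h' : (PySem.Str.startswith (PySem.Str.strip line) "|"
          && PySem.Str.endswith (PySem.Str.strip line) "|") = false := by
        unfold pvIsTbl at h; simpa using h
      have hf : pvIsTbl (PySem.Str.strip line) = false := by simpa using h
      constructor
      · intro acc
        simp only [pvALoop, h', Bool.false_eq_true, if_false]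
        rw [ih.1]
        simp [List.map_cons, pvBlocks_cons_para _ _ hf, pvRenderBlock]
      · intro acc
        simp only [pvALoop, h', Bool.false_eq_true, if_false, if_true]
        rw [ih.1]
        simp [List.map_cons, List.takeWhile_cons_of_neg, List.dropWhile_cons_of_neg,
          hf, pvBlocks_cons_para _ _ hf, pvRenderBlock]

-- ===== VERDICT (by name: the statement is the Claim_ definition above) =====
theorem markdown_table_to_html_py_spec : Claim_equal_markdown_table_to_html_py := by
  intro md _
  unfold Spec_markdown_table_to_html_py markdown_table_to_html_py markdown_table_to_html_py_alt
  have h := (pvLoop_eq (PySem.Str.splitlines (PySem.Str.strip md))).1 [pvHeader]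
  simp only [pvFin] at h
  rcases hp : pvALoop (PySem.Str.splitlines (PySem.Str.strip md)) false [pvHeader] with ⟨inT, hl⟩
  rw [hp] at h
  simp only [hp]
  simp [h]
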